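-- pv_equiv track=rewrite | github.com/ArcademMan/PyGate | app/core/wifi.py | suggest_channel
-- ===== SOURCE A (Python) =====
-- def suggest_channel(networks: list[dict]) -> dict:
--     """Suggerisce il canale meno congestionato.
--
--     Returns:
--         dict con chiavi: channel_2g, channel_5g, reason
--     """
--     channels_2g = {i: 0 for i in range(1, 14)}
--     channels_5g = {i: 0 for i in [36, 40, 44, 48, 52, 56, 60, 64,
--                                     100, 104, 108, 112, 116, 120, 124, 128,
--                                     132, 136, 140, 149, 153, 157, 161, 165]}
--
--     for net in networks:
--         ch = net["channel"]
--         if 1 <= ch <= 13: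
--             # 2.4GHz — ogni rete occupa ±2 canali
--             for c in range(max(1, ch - 2), min(14, ch + 3)):
--                 if c in channels_2g:
--                     channels_2g[c] += net["signal"]
--         elif ch in channels_5g:
--             channels_5g[ch] += net["signal"]
--
--     best_2g = min(channels_2g, key=channels_2g.get) if channels_2g else 1
--     best_5g = min(channels_5g, key=channels_5g.get) if channels_5g else 36
--
--     return {"channel_2g": best_2g, "channel_5g": best_5g}
-- ===== SOURCE B (Python) =====
-- CHANNELS_5G = [36, 40, 44, 48, 52, 56, 60, 64,
--                100, 104, 108, 112, 116, 120, 124, 128,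
--                132, 136, 140, 149, 153, 157, 161, 165]
--
--
-- def suggest_channel(networks: list[dict]) -> dict:
--     """Compute each candidate channel's congestion on demand (no scatter tables)."""
--     def cong_2g(c):
--         return sum(n["signal"] for n in networks
--                    if 1 <= n["channel"] <= 13 and abs(c - n["channel"]) <= 2)
--
--     def cong_5g(c):
--         return sum(n["signal"] for n in networks if n["channel"] == c)
--
--     best_2g = min(range(1, 14), key=cong_2g)
--     best_5g = min(CHANNELS_5G, key=cong_5g)
--     return {"channel_2g": best_2g, "channel_5g": best_5g}
-- ===== Notes on version B (the rewrite author's own statement) =====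
-- stated objective: alternative
-- what changed: B drops A's incrementally updated per-channel scatter dictionaries and instead computes each candidate channel's congestion on demand as a direct sum over the networks, picking the first argmin over the fixed candidate lists.
-- outside the precondition, e.g. on suggest_channel([{'signal': -40}]): A raises KeyError, B raises KeyError; on suggest_channel([{'channel': 6}]): A raises KeyError, B raises KeyError
import Mathlib
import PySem

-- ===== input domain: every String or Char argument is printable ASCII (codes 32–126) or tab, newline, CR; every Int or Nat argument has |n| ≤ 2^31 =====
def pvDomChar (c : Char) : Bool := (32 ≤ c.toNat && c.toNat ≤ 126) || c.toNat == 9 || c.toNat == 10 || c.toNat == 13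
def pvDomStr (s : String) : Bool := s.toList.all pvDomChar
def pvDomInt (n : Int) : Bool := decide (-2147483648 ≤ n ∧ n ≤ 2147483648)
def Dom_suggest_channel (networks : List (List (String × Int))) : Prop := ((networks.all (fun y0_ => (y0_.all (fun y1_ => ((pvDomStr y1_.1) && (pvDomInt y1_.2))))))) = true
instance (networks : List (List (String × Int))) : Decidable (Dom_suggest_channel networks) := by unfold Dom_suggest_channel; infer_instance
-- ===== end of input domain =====

-- B replaces A's incrementally updated scatter tables by an on-demand congestion sum
-- per candidate channel (objective: alternative decomposition, similar cost).

-- ===== PORT A =====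
-- the fixed 5GHz channel list of A (and B)
def ch5List : List Int :=
  [36, 40, 44, 48, 52, 56, 60, 64, 100, 104, 108, 112, 116, 120, 124, 128,
   132, 136, 140, 149, 153, 157, 161, 165]

-- loop body of A's 'for net in networks' (the two dict accumulators as a pair)
def stepA (st : PySem.Dict Int Int × PySem.Dict Int Int) (net : List (String × Int)) :
    PySem.Dict Int Int × PySem.Dict Int Int :=
  let nd := PySem.Dict.mk net
  let ch := nd.getD "channel" 0          -- net["channel"]; Pre_ guarantees the key is present
  if 1 ≤ ch ∧ ch ≤ 13 then
    ((PySem.List.pyRange (max 1 (ch - 2)) (min 14 (ch + 3)) 1).foldl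
        (fun d c => if d.contains c then d.modify c 0 (· + nd.getD "signal" 0) else d) st.1,
     st.2)
  else if st.2.contains ch then
    (st.1, st.2.modify ch 0 (· + nd.getD "signal" 0))
  else st

def suggest_channel (networks : List (List (String × Int))) : List (String × Int) :=
  let channels2g : PySem.Dict Int Int :=
    PySem.Dict.mk ((PySem.List.pyRange 1 14 1).map (fun i => (i, 0)))
  let channels5g : PySem.Dict Int Int := PySem.Dict.mk (ch5List.map (fun i => (i, 0)))
  let st := networks.foldl stepA (channels2g, channels5g)
  -- min(d, key=d.get): first key of minimal value, in insertion order; keys are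
  -- all present, so d.get k is the value (getD with unreachable default)
  let best2g : Int :=
    if st.1.size ≠ 0 then (PySem.List.min? st.1.keys (fun k => st.1.getD k 0)).getD 1 else 1
  let best5g : Int :=
    if st.2.size ≠ 0 then (PySem.List.min? st.2.keys (fun k => st.2.getD k 0)).getD 36 else 36
  [("channel_2g", best2g), ("channel_5g", best5g)]

-- ===== PORT B =====
def pyChan (n : List (String × Int)) : Int := (PySem.Dict.mk n).getD "channel" 0
def pySig (n : List (String × Int)) : Int := (PySem.Dict.mk n).getD "signal" 0

-- sum(n["signal"] for n in networks if 1 <= n["channel"] <= 13 and abs(c - n["channel"]) <= 2)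
def cong2 (networks : List (List (String × Int))) (c : Int) : Int :=
  ((networks.filter (fun n =>
      decide (1 ≤ pyChan n ∧ pyChan n ≤ 13 ∧ |c - pyChan n| ≤ 2))).map pySig).sum

-- sum(n["signal"] for n in networks if n["channel"] == c)
def cong5 (networks : List (List (String × Int))) (c : Int) : Int :=
  ((networks.filter (fun n => pyChan n == c)).map pySig).sum

def suggest_channel_alt (networks : List (List (String × Int))) : List (String × Int) :=
  -- min(candidates, key=cong): candidate lists are nonempty, the getD defaults are unreachable
  [("channel_2g", (PySem.List.min? (PySem.List.pyRange 1 14 1) (cong2 networks)).getD 1),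
   ("channel_5g", (PySem.List.min? ch5List (cong5 networks)).getD 36)]

-- ===== PRECONDITION & SPEC =====
-- Pre_ excludes inputs on which the Python A raises KeyError: a network dict without
-- a "channel" key, or an in-band one (2.4GHz 1..13 or a listed 5GHz channel) without
-- a "signal" key.
def Pre_suggest_channel (networks : List (List (String × Int))) : Prop :=
  ∀ net ∈ networks,
    (PySem.Dict.mk net).contains "channel" = true ∧
    (((1 ≤ (PySem.Dict.mk net).getD "channel" 0 ∧ (PySem.Dict.mk net).getD "channel" 0 ≤ 13) ∨
        (PySem.Dict.mk net).getD "channel" 0 ∈ ch5List) →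
      (PySem.Dict.mk net).contains "signal" = true)
instance (networks : List (List (String × Int))) : Decidable (Pre_suggest_channel networks) := by
  unfold Pre_suggest_channel; infer_instance

def pvWitness_suggest_channel : (List (List (String × Int))) :=
  [[("channel", 6), ("signal", -40)], [("channel", 36), ("signal", -70)]]

def Spec_suggest_channel (networks : List (List (String × Int))) (out : List (String × Int)) : Prop := out = suggest_channel_alt networks
instance (networks : List (List (String × Int))) (out : List (String × Int)) : Decidable (Spec_suggest_channel networks out) := by unfold Spec_suggest_channel; infer_instance

-- ===== CLAIM (what is proved, stated in full; the proofs are below) =====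
def Claim_equal_suggest_channel : Prop := ∀ (networks : List (List (String × Int))), Dom_suggest_channel networks → Pre_suggest_channel networks → Spec_suggest_channel networks (suggest_channel networks)

-- ===== LEMMAS AND PROOFS =====

-- the 2.4GHz candidate list, written out
def K2 : List Int := [1, 2, 3, 4, 5, 6, 7, 8, 9, 10, 11, 12, 13]

theorem pyRange_1_14 : PySem.List.pyRange 1 14 1 = K2 := by decide

theorem nodup_pyRange_one (a b : Int) : (PySem.List.pyRange a b 1).Nodup := by
  unfold PySem.List.pyRange
  simp only [if_neg (by norm_num : (1:Int) ≠ 0)]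
  refine List.Nodup.map ?_ List.nodup_range
  intro x y h; simp at h; omega

theorem getD_mk_zero (L : List Int) (c : Int) :
    (PySem.Dict.mk (L.map (fun i => (i, (0 : Int))))).getD c 0 = 0 := by
  induction L with
  | nil => rfl
  | cons a t ih =>
    simp only [List.map_cons, PySem.Dict.getD_eq_get?_getD, PySem.Dict.get?_mk_cons]
    split
    · rfl
    · rw [← PySem.Dict.getD_eq_get?_getD]; exact ih

theorem keys_mk_zero (L : List Int) :
    (PySem.Dict.mk (L.map (fun i => (i, (0 : Int))))).keys = L := by
  simp [PySem.Dict.keys_mk, Function.comp_def]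

theorem min?_congr {α : Type} (l : List α) (f g : α → Int)
    (h : ∀ x ∈ l, f x = g x) : PySem.List.min? l f = PySem.List.min? l g := by
  unfold PySem.List.min?
  suffices H : ∀ (l' : List α), (∀ x ∈ l', f x = g x) → ∀ (acc : Option α),
      (∀ m, acc = some m → f m = g m) →
      l'.foldl (fun acc x => match acc with
        | none => some x
        | some m => if f x < f m then some x else some m) acc =
      l'.foldl (fun acc x => match acc with
        | none => some x
        | some m => if g x < g m then some x else some m) acc by
    exact H l h none (by simp)
  intro l'
  induction l' with
  | nil => intro _ acc _; rfl
  | cons x t ih =>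
    intro hl acc hacc
    have hx : f x = g x := hl x (by simp)
    have h' : ∀ y ∈ t, f y = g y := fun y hy => hl y (List.mem_cons_of_mem _ hy)
    cases acc with
    | none =>
      simp only [List.foldl_cons]
      apply ih h'
      intro m hm
      injection hm with e; subst e; exact hx
    | some m0 =>
      have hm0 : f m0 = g m0 := hacc m0 rfl
      simp only [List.foldl_cons, hx, hm0]
      apply ih h'
      intro m hm
      by_cases hc : g x < g m0
      · simp only [if_pos hc] at hm
        injection hm with e; subst e; exact hx
      · simp only [if_neg hc] at hm
        injection hm with e; subst e; exact hm0

theorem cong2_cons (n : List (String × Int)) (t : List (List (String × Int))) (c : Int) :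
    cong2 (n :: t) c =
      (if 1 ≤ pyChan n ∧ pyChan n ≤ 13 ∧ |c - pyChan n| ≤ 2 then pySig n else 0) + cong2 t c := by
  by_cases h : 1 ≤ pyChan n ∧ pyChan n ≤ 13 ∧ |c - pyChan n| ≤ 2 <;>
    simp [cong2, h]

theorem cong5_cons (n : List (String × Int)) (t : List (List (String × Int))) (c : Int) :
    cong5 (n :: t) c = (if pyChan n = c then pySig n else 0) + cong5 t c := by
  by_cases h : pyChan n = c <;> simp [cong5, h]

-- the inner 'for c in range(...)' fold: keys unchanged, value at c bumped iff c ∈ R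
theorem inner2 (R : List Int) (hR : R.Nodup) (d : PySem.Dict Int Int) (s : Int)
    (hmem : ∀ k ∈ R, k ∈ d.keys) (c : Int) :
    (R.foldl (fun d c => if d.contains c then d.modify c 0 (· + s) else d) d).keys = d.keys ∧
    (R.foldl (fun d c => if d.contains c then d.modify c 0 (· + s) else d) d).getD c 0 =
      d.getD c 0 + (if c ∈ R then s else 0) := by
  induction R generalizing d with
  | nil => simp
  | cons k t ih =>
    have hkd : k ∈ d.keys := hmem k (by simp)
    have hcon : d.contains k = true := (PySem.Dict.contains_iff_mem_keys d k).mpr hkd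
    have hkeys : (d.modify k 0 (· + s)).keys = d.keys := by
      rw [PySem.Dict.keys_modify, PySem.Dict.keys_insert_of_contains _ _ hcon]
    have hmem' : ∀ k' ∈ t, k' ∈ (d.modify k 0 (· + s)).keys := by
      intro k' hk'; rw [hkeys]; exact hmem k' (List.mem_cons_of_mem _ hk')
    have hnt : t.Nodup := hR.of_cons
    have hknt : k ∉ t := (List.nodup_cons.mp hR).1
    obtain ⟨ihk, ihg⟩ := ih hnt (d.modify k 0 (· + s)) hmem'
    constructor
    · simp only [List.foldl_cons, if_pos hcon]
      rw [ihk, hkeys]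
    · simp only [List.foldl_cons, if_pos hcon]
      rw [ihg, PySem.Dict.getD_modify]
      by_cases hck : c = k
      · subst hck
        simp [hknt]
      · simp [hck, List.mem_cons]

def step2 (d : PySem.Dict Int Int) (net : List (String × Int)) : PySem.Dict Int Int :=
  let nd := PySem.Dict.mk net
  let ch := nd.getD "channel" 0
  if 1 ≤ ch ∧ ch ≤ 13 then
    (PySem.List.pyRange (max 1 (ch - 2)) (min 14 (ch + 3)) 1).foldl
      (fun d c => if d.contains c then d.modify c 0 (· + nd.getD "signal" 0) else d) d
  else d

def step5 (d : PySem.Dict Int Int) (net : List (String × Int)) : PySem.Dict Int Int :=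
  let nd := PySem.Dict.mk net
  let ch := nd.getD "channel" 0
  if 1 ≤ ch ∧ ch ≤ 13 then d
  else if d.contains ch then d.modify ch 0 (· + nd.getD "signal" 0) else d

theorem stepA_eq (st : PySem.Dict Int Int × PySem.Dict Int Int) (net : List (String × Int)) :
    stepA st net = (step2 st.1 net, step5 st.2 net) := by
  simp only [stepA, step2, step5]
  split_ifs <;> rfl

theorem outer2 (nets : List (List (String × Int))) (d : PySem.Dict Int Int)
    (hk : d.keys = K2) :
    (nets.foldl step2 d).keys = K2 ∧
    ∀ c ∈ K2, (nets.foldl step2 d).getD c 0 = d.getD c 0 + cong2 nets c := by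
  induction nets generalizing d with
  | nil => exact ⟨hk, by intro c _; simp [cong2]⟩
  | cons n t ih =>
    have hstep : (step2 d n).keys = K2 ∧
        ∀ c ∈ K2, (step2 d n).getD c 0 =
          d.getD c 0 + (if 1 ≤ pyChan n ∧ pyChan n ≤ 13 ∧ |c - pyChan n| ≤ 2 then pySig n else 0) := by
      unfold step2
      by_cases hib : 1 ≤ (PySem.Dict.mk n).getD "channel" 0 ∧ (PySem.Dict.mk n).getD "channel" 0 ≤ 13
      · rw [if_pos hib]
        set ch := (PySem.Dict.mk n).getD "channel" 0 with hch
        have hmemR : ∀ k ∈ PySem.List.pyRange (max 1 (ch - 2)) (min 14 (ch + 3)) 1, k ∈ d.keys := by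
          intro k hkR
          rw [hk]
          have := PySem.List.mem_pyRange_one.mp hkR
          simp [K2]
          omega
        constructor
        · rw [(inner2 _ (nodup_pyRange_one _ _) d _ hmemR 0).1, hk]
        · intro c hc
          rw [(inner2 _ (nodup_pyRange_one _ _) d _ hmemR c).2]
          have hcb : 1 ≤ c ∧ c ≤ 13 := by
            simp [K2] at hc; omega
          have : (c ∈ PySem.List.pyRange (max 1 (ch - 2)) (min 14 (ch + 3)) 1) ↔
              (1 ≤ pyChan n ∧ pyChan n ≤ 13 ∧ |c - pyChan n| ≤ 2) := by
            rw [PySem.List.mem_pyRange_one]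
            unfold pyChan
            rw [← hch]
            constructor
            · intro h; refine ⟨hib.1, hib.2, ?_⟩; rw [abs_le]; omega
            · intro h; have := abs_le.mp h.2.2; omega
          by_cases hmemc : 1 ≤ pyChan n ∧ pyChan n ≤ 13 ∧ |c - pyChan n| ≤ 2
          · rw [if_pos hmemc, if_pos (this.mpr hmemc)]; rfl
          · rw [if_neg hmemc, if_neg (fun hh => hmemc (this.mp hh))]
      · rw [if_neg hib]
        refine ⟨hk, ?_⟩
        intro c hc
        have : ¬(1 ≤ pyChan n ∧ pyChan n ≤ 13 ∧ |c - pyChan n| ≤ 2) := by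
          unfold pyChan; tauto
        simp [this]
    obtain ⟨ihk, ihg⟩ := ih (step2 d n) hstep.1
    refine ⟨ihk, ?_⟩
    intro c hc
    simp only [List.foldl_cons]
    rw [ihg c hc, hstep.2 c hc, cong2_cons]
    ring

theorem outer5 (nets : List (List (String × Int))) (d : PySem.Dict Int Int)
    (hk : d.keys = ch5List) :
    (nets.foldl step5 d).keys = ch5List ∧
    ∀ c ∈ ch5List, (nets.foldl step5 d).getD c 0 = d.getD c 0 + cong5 nets c := by
  induction nets generalizing d with
  | nil => exact ⟨hk, by intro c _; simp [cong5]⟩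
  | cons n t ih =>
    have hstep : (step5 d n).keys = ch5List ∧
        ∀ c ∈ ch5List, (step5 d n).getD c 0 =
          d.getD c 0 + (if pyChan n = c then pySig n else 0) := by
      unfold step5
      by_cases hib : 1 ≤ (PySem.Dict.mk n).getD "channel" 0 ∧ (PySem.Dict.mk n).getD "channel" 0 ≤ 13
      · rw [if_pos hib]
        refine ⟨hk, ?_⟩
        intro c hc
        have hne : ¬(pyChan n = c) := by
          intro he
          unfold pyChan at he
          simp [ch5List] at hc
          omega
        simp [hne]
      · rw [if_neg hib]
        by_cases hcon : d.contains ((PySem.Dict.mk n).getD "channel" 0) = true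
        · rw [if_pos hcon]
          constructor
          · rw [PySem.Dict.keys_modify,
              PySem.Dict.keys_insert_of_contains _ _ hcon, hk]
          · intro c hc
            rw [PySem.Dict.getD_modify]
            unfold pyChan
            by_cases hck : c = (PySem.Dict.mk n).getD "channel" 0
            · rw [if_pos hck, if_pos hck.symm, hck]; rfl
            · rw [if_neg hck, if_neg (fun h => hck h.symm)]; ring
        · rw [if_neg hcon]
          refine ⟨hk, ?_⟩
          intro c hc
          have hne : ¬(pyChan n = c) := by
            intro he
            apply hcon
            rw [PySem.Dict.contains_iff_mem_keys, hk]
            unfold pyChan at he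
            rw [he]; exact hc
          simp [hne]
    obtain ⟨ihk, ihg⟩ := ih (step5 d n) hstep.1
    refine ⟨ihk, ?_⟩
    intro c hc
    simp only [List.foldl_cons]
    rw [ihg c hc, hstep.2 c hc, cong5_cons]
    ring

-- ===== VERDICT (by name: the statement is the Claim_ definition above) =====
theorem suggest_channel_spec : Claim_equal_suggest_channel := by
  intro networks _dom _pre
  unfold Spec_suggest_channel
  simp only [suggest_channel, suggest_channel_alt]
  rw [PySem.List.foldl_congr_mem networks stepA
        (fun st net => (step2 st.1 net, step5 st.2 net)) _
        (fun acc x _ => stepA_eq acc x),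
      PySem.List.foldl_prod_mk, pyRange_1_14]
  have hk2 : (PySem.Dict.mk (K2.map (fun i => (i, (0 : Int))))).keys = K2 := keys_mk_zero K2
  have hk5 : (PySem.Dict.mk (ch5List.map (fun i => (i, (0 : Int))))).keys = ch5List :=
    keys_mk_zero ch5List
  obtain ⟨hkeys2, hget2⟩ := outer2 networks _ hk2
  obtain ⟨hkeys5, hget5⟩ := outer5 networks _ hk5
  have hsize2 : (networks.foldl step2 (PySem.Dict.mk (K2.map (fun i => (i, (0 : Int)))))).size =
      (networks.foldl step2 (PySem.Dict.mk (K2.map (fun i => (i, (0 : Int)))))).keys.length := by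
    simp [PySem.Dict.size, PySem.Dict.keys]
  have hsize5 : (networks.foldl step5 (PySem.Dict.mk (ch5List.map (fun i => (i, (0 : Int)))))).size =
      (networks.foldl step5 (PySem.Dict.mk (ch5List.map (fun i => (i, (0 : Int)))))).keys.length := by
    simp [PySem.Dict.size, PySem.Dict.keys]
  rw [hsize2, hsize5, hkeys2, hkeys5]
  have hmin2 : PySem.List.min? K2
      (fun k => (networks.foldl step2 (PySem.Dict.mk (K2.map (fun i => (i, (0 : Int)))))).getD k 0) =
      PySem.List.min? K2 (cong2 networks) := by
    apply min?_congr
    intro k hkm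
    rw [hget2 k hkm, getD_mk_zero, zero_add]
  have hmin5 : PySem.List.min? ch5List
      (fun k => (networks.foldl step5 (PySem.Dict.mk (ch5List.map (fun i => (i, (0 : Int)))))).getD k 0) =
      PySem.List.min? ch5List (cong5 networks) := by
    apply min?_congr
    intro k hkm
    rw [hget5 k hkm, getD_mk_zero, zero_add]
  rw [hkeys2, hkeys5] at *
  simp only [hmin2, hmin5]
  norm_num [K2, ch5List]
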